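-- pv_equiv track=rewrite | github.com/ram677/gfg_pod | Problem_of_the_Day/shop_in_candy_store.py | minMaxCandy
-- ===== SOURCE A (Python) =====
-- def minMaxCandy(prices, k):
--     prices.sort()
--     n = len(prices)
--
--     # Minimum cost
--     min_cost = 0
--     i, j = 0, n - 1
--     while i <= j:
--         min_cost += prices[i]
--         i += 1
--         j -= k  # take k freebies from the end
--
--     # Maximum cost
--     max_cost = 0
--     i, j = 0, n - 1
--     while i <= j:
--         max_cost += prices[j]
--         j -= 1
--         i += k  # take k freebies from the start
--
--     return [min_cost, max_cost]
-- ===== SOURCE B (Python) =====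
-- def minMaxCandy(prices, k):
--     prices.sort()
--     n = len(prices)
--     t = (n - 1) // (k + 1) + 1  # number of items actually bought by either greedy
--     return [sum(prices[:t]), sum(prices[n - t:])]
-- ===== Notes on version B (the rewrite author's own statement) =====
-- stated objective: simpler
-- what changed: Replaced the two pointer-simulation while-loops by a closed-form count t = (n-1)//(k+1)+1 of items bought and two slice-sums sum(prices[:t]) and sum(prices[n-t:]).
-- outside the precondition, e.g. on minMaxCandy([], -2): A returns [0, 0], B returns [0, 0]; on minMaxCandy([], -1): A returns [0, 0], B raises ZeroDivisionError
import Mathlib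
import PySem

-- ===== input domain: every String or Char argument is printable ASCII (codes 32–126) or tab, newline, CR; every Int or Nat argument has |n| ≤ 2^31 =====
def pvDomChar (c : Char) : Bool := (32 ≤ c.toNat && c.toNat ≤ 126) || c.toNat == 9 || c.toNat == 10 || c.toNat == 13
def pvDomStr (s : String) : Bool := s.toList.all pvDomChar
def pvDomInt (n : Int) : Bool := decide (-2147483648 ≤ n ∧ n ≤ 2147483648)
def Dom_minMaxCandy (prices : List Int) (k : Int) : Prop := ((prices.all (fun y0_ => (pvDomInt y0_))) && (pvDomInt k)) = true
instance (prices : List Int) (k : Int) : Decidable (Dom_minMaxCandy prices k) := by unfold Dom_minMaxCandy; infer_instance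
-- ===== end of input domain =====

-- B replaces A's two pointer-simulation while-loops by a closed-form count of bought
-- items and two slice-sums (objective: simpler). Equivalence is about the return value;
-- both A and B sort `prices` in place in Python.

-- ===== PORT A =====
-- while i <= j: min_cost += prices[i]; i += 1; j -= k
-- (fuel bounds the iteration count; for 0 ≤ k the loop runs at most prices.length times,
--  for k < 0 the Python loop diverges on nonempty lists — excluded by Pre_)
def minLoopA (prices : List Int) (k : Int) : Nat → Int → Int → Int → Int
  | 0, _, _, acc => acc
  | fuel+1, i, j, acc =>
    if i ≤ j then
      minLoopA prices k fuel (i + 1) (j - k) (acc + PySem.List.pyGetD prices i 0)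
    else acc

-- while i <= j: max_cost += prices[j]; j -= 1; i += k
def maxLoopA (prices : List Int) (k : Int) : Nat → Int → Int → Int → Int
  | 0, _, _, acc => acc
  | fuel+1, i, j, acc =>
    if i ≤ j then
      maxLoopA prices k fuel (i + k) (j - 1) (acc + PySem.List.pyGetD prices j 0)
    else acc

def minMaxCandy (prices : List Int) (k : Int) : List Int :=
  let ps := PySem.List.sorted prices (fun x => x) false
  let n : Int := ps.length
  [minLoopA ps k ps.length 0 (n - 1) 0, maxLoopA ps k ps.length 0 (n - 1) 0]

-- ===== PORT B =====
def minMaxCandy_alt (prices : List Int) (k : Int) : List Int :=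
  let ps := PySem.List.sorted prices (fun x => x) false
  let n : Int := ps.length
  let t := PySem.Int.floordiv (n - 1) (k + 1) + 1
  [(PySem.List.slice ps none (some t)).sum, (PySem.List.slice ps (some (n - t)) none).sum]

-- ===== PRECONDITION & SPEC =====
-- Pre_ requires 0 ≤ k: for negative k A's while-loops never terminate on nonempty lists
-- (j - k grows), and on the empty list with k = -1 B raises ZeroDivisionError.
def Pre_minMaxCandy (prices : List Int) (k : Int) : Prop := 0 ≤ k
instance (prices : List Int) (k : Int) : Decidable (Pre_minMaxCandy prices k) := by unfold Pre_minMaxCandy; infer_instance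
def pvWitness_minMaxCandy : List Int × Int := ([3, 1, 2], 1)

def Spec_minMaxCandy (prices : List Int) (k : Int) (out : List Int) : Prop := out = minMaxCandy_alt prices k
instance (prices : List Int) (k : Int) (out : List Int) : Decidable (Spec_minMaxCandy prices k out) := by unfold Spec_minMaxCandy; infer_instance

-- ===== CLAIM (what is proved, stated in full; the proofs are below) =====
def Claim_equal_minMaxCandy : Prop := ∀ (prices : List Int) (k : Int), Dom_minMaxCandy prices k → Pre_minMaxCandy prices k → Spec_minMaxCandy prices k (minMaxCandy prices k)

-- ===== LEMMAS AND PROOFS =====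

-- abbreviation used only in the proofs: the common number of items both loops buy
def pvT (n k : Int) : Int := PySem.Int.floordiv (n - 1) (k + 1) + 1

theorem pvT_nonneg (n k : Int) (hn : 0 ≤ n) (hk : 0 ≤ k) : 0 ≤ pvT n k := by
  unfold pvT
  have h := (PySem.Int.le_floordiv_iff_mul_le (a := n - 1) (b := k + 1) (q := -1) (by omega)).mpr (by nlinarith)
  omega

theorem pvT_le (n k : Int) (hn : 0 ≤ n) (hk : 0 ≤ k) : pvT n k ≤ n := by
  unfold pvT
  have h := (PySem.Int.floordiv_lt_iff_lt_mul (a := n - 1) (b := k + 1) (q := n) (by omega)).mpr (by nlinarith)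
  omega

theorem minLoopA_spec (ps : List Int) (k : Int) (hk : 0 ≤ k)
    (fuel : Nat) (i acc : Int) (hi : 0 ≤ i)
    (hfuel : pvT ps.length k - i ≤ (fuel : Int)) :
    minLoopA ps k fuel i ((ps.length : Int) - 1 - k * i) acc
      = acc + ((ps.drop i.toNat).take (pvT ps.length k - i).toNat).sum := by
  induction fuel generalizing i acc with
  | zero =>
      simp only [minLoopA]
      have : (pvT ps.length k - i).toNat = 0 := by omega
      simp [this]
  | succ fuel ih =>
      set n : Int := (ps.length : Int) with hn
      have hn0 : 0 ≤ n := by positivity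
      simp only [minLoopA]
      by_cases hcond : i ≤ n - 1 - k * i
      · -- loop body runs: i < pvT n k
        have hlt : i < pvT n k := by
          unfold pvT
          have := (PySem.Int.le_floordiv_iff_mul_le (a := n - 1) (b := k + 1) (q := i) (by omega)).mpr (by nlinarith)
          omega
        have hin : i.toNat < ps.length := by
          have := pvT_le n k hn0 hk
          omega
        have hstep : n - 1 - k * i - k = n - 1 - k * (i + 1) := by ring
        rw [if_pos hcond, hstep, ih (i + 1) _ (by omega) (by omega)]
        have hdrop : ps.drop i.toNat = ps[i.toNat] :: ps.drop (i.toNat + 1) := by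
          exact (List.drop_eq_getElem_cons hin)
        have htn : (pvT n k - i).toNat = (pvT n k - (i + 1)).toNat + 1 := by omega
        have hit : (i + 1).toNat = i.toNat + 1 := by omega
        rw [PySem.List.pyGetD_eq_getElem ps 0 hi (by omega), hdrop, htn, hit,
          List.take_succ_cons, List.sum_cons]
        ring
      · -- loop exits: pvT n k ≤ i
        have hge : pvT n k ≤ i := by
          unfold pvT
          have := (PySem.Int.floordiv_lt_iff_lt_mul (a := n - 1) (b := k + 1) (q := i) (by omega)).mpr (by nlinarith)
          omega
        rw [if_neg hcond]
        have : (pvT n k - i).toNat = 0 := by omega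
        simp [this]

theorem maxLoopA_spec (ps : List Int) (k : Int) (hk : 0 ≤ k)
    (fuel : Nat) (m acc : Int) (hm : 0 ≤ m)
    (hfuel : pvT ps.length k - m ≤ (fuel : Int)) :
    maxLoopA ps k fuel (k * m) ((ps.length : Int) - 1 - m) acc
      = acc + ((ps.drop ((ps.length : Int) - pvT ps.length k).toNat).take (pvT ps.length k - m).toNat).sum := by
  induction fuel generalizing m acc with
  | zero =>
      simp only [maxLoopA]
      have : (pvT ps.length k - m).toNat = 0 := by omega
      simp [this]
  | succ fuel ih =>
      set n : Int := (ps.length : Int) with hn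
      have hn0 : 0 ≤ n := by positivity
      have htle : pvT n k ≤ n := pvT_le n k hn0 hk
      simp only [maxLoopA]
      by_cases hcond : k * m ≤ n - 1 - m
      · have hlt : m < pvT n k := by
          unfold pvT
          have := (PySem.Int.le_floordiv_iff_mul_le (a := n - 1) (b := k + 1) (q := m) (by omega)).mpr (by nlinarith)
          omega
        have hstep1 : k * m + k = k * (m + 1) := by ring
        have hstep2 : n - 1 - m - 1 = n - 1 - (m + 1) := by ring
        rw [if_pos hcond, hstep1, hstep2, ih (m + 1) _ (by omega) (by omega)]
        -- the element added this iteration is ps[n-1-m]; it is the LAST element of the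
        -- remaining segment [n-t, n-1-m]
        have hidx : (n - 1 - m) = (n - pvT n k) + (pvT n k - (m + 1)) := by ring
        have hjn : (n - 1 - m).toNat < ps.length := by omega
        have htn : (pvT n k - m).toNat = (pvT n k - (m + 1)).toNat + 1 := by omega
        have hlen : (pvT n k - (m + 1)).toNat < (ps.drop (n - pvT n k).toNat).length := by
          rw [List.length_drop]; omega
        rw [PySem.List.pyGetD_eq_getElem ps 0 (show (0:Int) ≤ n - 1 - m by omega) (by omega), htn,
          List.take_add_one, List.sum_append]
        have hidx2 : (n - pvT n k).toNat + (pvT n k - (m + 1)).toNat = (n - 1 - m).toNat := by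
          omega
        have hget : (ps.drop (n - pvT n k).toNat)[(pvT n k - (m + 1)).toNat]? =
            some ps[(n - 1 - m).toNat] := by
          rw [List.getElem?_eq_getElem hlen, List.getElem_drop]
          simp only [hidx2]
        rw [hget]
        simp only [Option.toList_some, List.sum_cons, List.sum_nil]
        ring
      · have hge : pvT n k ≤ m := by
          unfold pvT
          have := (PySem.Int.floordiv_lt_iff_lt_mul (a := n - 1) (b := k + 1) (q := m) (by omega)).mpr (by nlinarith)
          omega
        rw [if_neg hcond]
        have : (pvT n k - m).toNat = 0 := by omega
        simp [this]

-- ===== VERDICT (by name: the statement is the Claim_ definition above) =====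
theorem minMaxCandy_spec : Claim_equal_minMaxCandy := by
  intro prices k _ hk
  unfold Spec_minMaxCandy minMaxCandy minMaxCandy_alt
  set ps := PySem.List.sorted prices (fun x => x) false with hps
  have hn0 : (0 : Int) ≤ (ps.length : Int) := by positivity
  have ht0 : 0 ≤ pvT ps.length k := pvT_nonneg ps.length k hn0 hk
  have htle : pvT ps.length k ≤ (ps.length : Int) := pvT_le ps.length k hn0 hk
  have hmin := minLoopA_spec ps k hk ps.length 0 0 le_rfl (by omega)
  have hmax := maxLoopA_spec ps k hk ps.length 0 0 le_rfl (by omega)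
  simp only [mul_zero, sub_zero, Int.toNat_zero, List.drop_zero, zero_add] at hmin hmax
  show [minLoopA ps k ps.length 0 ((ps.length : Int) - 1) 0,
        maxLoopA ps k ps.length 0 ((ps.length : Int) - 1) 0]
      = [(PySem.List.slice ps none (some (pvT ps.length k))).sum,
         (PySem.List.slice ps (some ((ps.length : Int) - pvT ps.length k)) none).sum]
  have hfull : (List.drop ((ps.length : Int) - pvT ps.length k).toNat ps).length
      ≤ (pvT ps.length k).toNat := by
    rw [List.length_drop]; omega
  rw [hmin, hmax, PySem.List.slice_to ps ht0, PySem.List.slice_from ps (by omega),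
    List.take_of_length_le hfull]
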